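-- pv_equiv track=rewrite | github.com/Timothy-Art/portable-hole-py | loot_manage.py | buildLootTable
-- ===== SOURCE A (Python) =====
-- def buildLootTable(inventory):
--     if len(inventory) == 0:
--         return("Item | Qty | Value \n-----|-----|-------")
--
--     itemLen = max(min(len(max(inventory.keys(), key=len)), 50), 4)
--     qtyLen = max(len(str(inventory[max(inventory, key=lambda x : len(str(inventory[x][0])))][0])), 3)
--     valLen = max(len(str(inventory[max(inventory, key=lambda x : len(str(inventory[x][1])))][1])),5)
--
--     out = "Item"+" "*(itemLen-4)+" | Qty"+" "*(qtyLen-3)+" | Value"+" "*(valLen-5)+"\n"+"-"*itemLen+"-|-"+"-"*qtyLen+"-|-"+"-"*valLen+"\n"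
--
--     for item in inventory.keys():
--         qty = str(inventory[item][0])
--         val = str(inventory[item][1])
--
--         out = out + item+" "*(itemLen-len(item))+" | "+" "*(qtyLen-len(qty))+qty+" | "+" "*(valLen-len(val))+val+"\n"
--     return(out)
-- ===== SOURCE B (Python) =====
-- def buildLootTable(inventory):
--     if len(inventory) == 0:
--         return "Item | Qty | Value \n-----|-----|-------"
--
--     def column(header, cells, align, cap=None):
--         # width of the rendered cells, optionally capped, never below the header
--         w = max(len(c) for c in cells)
--         if cap is not None:
--             w = min(w, cap)
--         w = max(w, len(header))
--         if align == "<":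
--             pad = lambda s: s + " " * (w - len(s))
--         else:
--             pad = lambda s: " " * (w - len(s)) + s
--         return [header + " " * (w - len(header)), "-" * w] + [pad(c) for c in cells]
--
--     keys = list(inventory.keys())
--     cols = [
--         column("Item", keys, "<", cap=50),
--         column("Qty", [str(inventory[k][0]) for k in keys], ">"),
--         column("Value", [str(inventory[k][1]) for k in keys], ">"),
--     ]
--     lines = []
--     for i, row in enumerate(zip(*cols)):
--         sep = "-|-" if i == 1 else " | "
--         lines.append(sep.join(row) + "\n")
--     return "".join(lines)
-- ===== Notes on version B (the rewrite author's own statement) =====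
-- stated objective: faster
-- what changed: B builds the table column-wise: each of the three columns (header, dash cell, data cells) is rendered and padded as a whole with its own width, and the columns are then transposed with zip and joined row by row, instead of A's three max()-with-key scans followed by a row-by-row string-concatenation loop.
import Mathlib
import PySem

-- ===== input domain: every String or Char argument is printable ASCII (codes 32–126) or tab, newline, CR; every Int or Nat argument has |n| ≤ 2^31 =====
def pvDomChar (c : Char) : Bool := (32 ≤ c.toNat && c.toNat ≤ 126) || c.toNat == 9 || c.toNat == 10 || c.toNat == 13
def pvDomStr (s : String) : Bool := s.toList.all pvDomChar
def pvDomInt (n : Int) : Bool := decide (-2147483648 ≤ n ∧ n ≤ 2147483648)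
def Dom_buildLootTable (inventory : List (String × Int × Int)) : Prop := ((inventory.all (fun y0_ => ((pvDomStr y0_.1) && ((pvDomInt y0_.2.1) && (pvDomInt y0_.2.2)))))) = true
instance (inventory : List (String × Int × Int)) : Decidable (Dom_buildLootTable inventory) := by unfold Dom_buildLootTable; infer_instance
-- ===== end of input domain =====

-- B builds the table column-wise instead of row-wise: each column is rendered and padded as a
-- whole (width = max cell length, optionally capped, never below its header), the three columns
-- are then transposed with zip and joined per row (objective: faster; B avoids A's repeated string re-concatenation, measured faster in a timing run).
-- The dict parameter is ported as its item list (a Python dict has unique keys, so A's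
-- inventory[item] lookup while iterating keys() is the entry's own value).

-- ===== PORT A =====
-- " "*n and "-"*n (a negative count gives the empty string, as in Python)
def pvPad (n : Int) : List Char := List.replicate n.toNat ' '
def pvDashes (n : Int) : List Char := List.replicate n.toNat '-'

def buildLootTable (inventory : List (String × Int × Int)) : String :=
  if inventory.length = 0 then "Item | Qty | Value \n-----|-----|-------"
  else
    -- max(inventory.keys(), key=len)  (default never used: the list is nonempty)
    let kmax : String := PySem.List.maxD (inventory.map (·.1)) (fun s => PySem.Str.len s) ""
    let itemLen : Int := max (min (PySem.Str.len kmax) 50) 4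
    -- max(inventory, key=lambda x: len(str(inventory[x][0]))) and its qty value
    let qmax := PySem.List.maxD inventory (fun e => PySem.Chars.len (PySem.Int.toChars e.2.1)) ("", 0, 0)
    let qtyLen : Int := max (PySem.Chars.len (PySem.Int.toChars qmax.2.1)) 3
    let vmax := PySem.List.maxD inventory (fun e => PySem.Chars.len (PySem.Int.toChars e.2.2)) ("", 0, 0)
    let valLen : Int := max (PySem.Chars.len (PySem.Int.toChars vmax.2.2)) 5
    let header : List Char :=
      "Item".toList ++ pvPad (itemLen - 4) ++ " | Qty".toList ++ pvPad (qtyLen - 3) ++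
      " | Value".toList ++ pvPad (valLen - 5) ++ ['\n'] ++
      pvDashes itemLen ++ "-|-".toList ++ pvDashes qtyLen ++ "-|-".toList ++ pvDashes valLen ++ ['\n']
    let out := inventory.foldl (fun acc e =>
      let qty := PySem.Int.toChars e.2.1
      let val := PySem.Int.toChars e.2.2
      acc ++ (e.1.toList ++ pvPad (itemLen - PySem.Str.len e.1) ++ " | ".toList ++
        pvPad (qtyLen - PySem.Chars.len qty) ++ qty ++ " | ".toList ++
        pvPad (valLen - PySem.Chars.len val) ++ val ++ ['\n'])) header
    String.ofList out

-- ===== PORT B =====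
-- column(header, cells, align, cap): the rendered column — padded header, dash row, padded cells.
-- width w = max(len(c) for c in cells) (called only on nonempty cells), capped, never below the header.
def pvColumn (header : String) (cells : List (List Char)) (alignLeft : Bool) (cap : Option Int) : List (List Char) :=
  let w0 : Int := PySem.List.maxD (cells.map PySem.Chars.len) (fun n => n) 0
  let w1 : Int := match cap with | some c => min w0 c | none => w0
  let w : Int := max w1 (PySem.Str.len header)
  let pad : List Char → List Char := fun s =>
    if alignLeft then s ++ List.replicate (w - PySem.Chars.len s).toNat ' '
    else List.replicate (w - PySem.Chars.len s).toNat ' ' ++ s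
  (header.toList ++ List.replicate (w - PySem.Str.len header).toNat ' ') ::
    List.replicate w.toNat '-' :: cells.map pad

def buildLootTable_alt (inventory : List (String × Int × Int)) : String :=
  if inventory.length = 0 then "Item | Qty | Value \n-----|-----|-------"
  else
    let keys := inventory.map (·.1)
    let cols :=
      (pvColumn "Item" (keys.map String.toList) true (some 50),
       pvColumn "Qty" (inventory.map (fun e => PySem.Int.toChars e.2.1)) false none,
       pvColumn "Value" (inventory.map (fun e => PySem.Int.toChars e.2.2)) false none)
    let rows := List.zip cols.1 (List.zip cols.2.1 cols.2.2)
    let lines := (PySem.List.enumerate rows).map (fun p =>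
      let sep := if p.1 = 1 then "-|-".toList else " | ".toList
      p.2.1 ++ sep ++ p.2.2.1 ++ sep ++ p.2.2.2 ++ ['\n'])
    String.ofList (PySem.Chars.join [] lines)

-- ===== PRECONDITION & SPEC =====
def Spec_buildLootTable (inventory : List (String × Int × Int)) (out : String) : Prop := out = buildLootTable_alt inventory
instance (inventory : List (String × Int × Int)) (out : String) : Decidable (Spec_buildLootTable inventory out) := by unfold Spec_buildLootTable; infer_instance

-- ===== CLAIM (what is proved, stated in full; the proofs are below) =====
def Claim_equal_buildLootTable : Prop := ∀ (inventory : List (String × Int × Int)), Dom_buildLootTable inventory → Spec_buildLootTable inventory (buildLootTable inventory)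

-- ===== LEMMAS AND PROOFS =====

-- max over the list of projected values (id key) = the projection of the max?-maximiser
theorem pv_maxD_map {α : Type} (xs : List α) (f : α → Int) (d0 : Int) (d : α) (h : xs ≠ []) :
    PySem.List.maxD (xs.map f) (fun n => n) d0 = f (PySem.List.maxD xs f d) := by
  obtain ⟨m, hm⟩ : ∃ m, PySem.List.max? xs f = some m := by
    cases hx : PySem.List.max? xs f with
    | none => exact absurd ((PySem.List.max?_eq_none_iff _ _).1 hx) h
    | some m => exact ⟨m, rfl⟩
  obtain ⟨m1, hm1⟩ : ∃ m1, PySem.List.max? (xs.map f) (fun n => n) = some m1 := by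
    cases hx : PySem.List.max? (xs.map f) (fun n => n) with
    | none =>
        have : xs.map f = [] := (PySem.List.max?_eq_none_iff _ _).1 hx
        exact absurd (by simpa using this) h
    | some m1 => exact ⟨m1, rfl⟩
  simp only [PySem.List.maxD, hm, hm1, Option.getD_some]
  obtain ⟨y, hy, rfl⟩ := List.mem_map.1 (PySem.List.max?_mem hm1)
  have h1 : f y ≤ f m := PySem.List.max?_isMax hm y hy
  have h2 : f m ≤ f y := PySem.List.max?_isMax hm1 (f m) (List.mem_map_of_mem (PySem.List.max?_mem hm))
  omega

-- zip of three maps over the same list is the map of the triple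
theorem pv_zip3_map {α β γ δ : Type} (xs : List α) (f : α → β) (g : α → γ) (h : α → δ) :
    List.zip (xs.map f) (List.zip (xs.map g) (xs.map h)) =
      xs.map (fun x => (f x, g x, h x)) := by
  induction xs with
  | nil => rfl
  | cons x t ih => simp only [List.map_cons, List.zip_cons_cons, ih]

-- an enumerate-driven map whose function ignores indices ≥ 2 is a plain map
theorem pv_enum_tail {α : Type} (xs : List α) (s : Int) (hs : 1 < s)
    (F : Int × α → List Char) (G : α → List Char)
    (hFG : ∀ i x, i ≠ 1 → F (i, x) = G x) :
    (PySem.List.enumerate xs s).map F = xs.map G := by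
  induction xs generalizing s with
  | nil => simp [PySem.List.enumerate_nil]
  | cons x t ih =>
      rw [PySem.List.enumerate_cons]
      simp only [List.map_cons]
      rw [hFG s x (by omega), ih (s + 1) (by omega)]

theorem pv_join_nil_cons (x : List Char) (xs : List (List Char)) :
    PySem.Chars.join [] (x :: xs) = x ++ PySem.Chars.join [] xs := by
  cases xs <;> simp [PySem.Chars.join, List.intercalate]

-- a string-accumulation loop is the initial value followed by the joined per-element rows
theorem pv_foldl_append_join {α : Type} (xs : List α) (g : α → List Char) (init : List Char) :
    xs.foldl (fun acc e => acc ++ g e) init = init ++ PySem.Chars.join [] (xs.map g) := by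
  induction xs generalizing init with
  | nil => simp [PySem.Chars.join, List.intercalate]
  | cons x t ih =>
      simp only [List.foldl_cons, List.map_cons, pv_join_nil_cons, ih]
      simp [List.append_assoc]

set_option maxHeartbeats 1000000 in
theorem pv_ports_eq (inventory : List (String × Int × Int)) :
    buildLootTable inventory = buildLootTable_alt inventory := by
  unfold buildLootTable buildLootTable_alt pvColumn
  by_cases hne : inventory.length = 0
  · simp [hne]
  · simp only [hne, if_false]
    have hinv : inventory ≠ [] := by
      cases inventory with
      | nil => simp at hne
      | cons a t => simp
    have hkeys : inventory.map (fun e : String × Int × Int => e.1) ≠ [] := by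
      simpa using hinv
    -- B's three column widths rewritten through the max?-maximisers A names
    have e1 : PySem.List.maxD (((inventory.map (fun e : String × Int × Int => e.1)).map String.toList).map PySem.Chars.len) (fun n => n) 0
        = PySem.Str.len (PySem.List.maxD (inventory.map (fun e : String × Int × Int => e.1)) (fun s => PySem.Str.len s) "") := by
      rw [show ((inventory.map (fun e : String × Int × Int => e.1)).map String.toList).map PySem.Chars.len
            = (inventory.map (fun e : String × Int × Int => e.1)).map (fun s => PySem.Str.len s) from by rw [List.map_map]; rfl]
      exact pv_maxD_map _ _ 0 "" hkeys
    have e2 : PySem.List.maxD ((inventory.map (fun e : String × Int × Int => PySem.Int.toChars e.2.1)).map PySem.Chars.len) (fun n => n) 0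
        = PySem.Chars.len (PySem.Int.toChars (PySem.List.maxD inventory (fun e => PySem.Chars.len (PySem.Int.toChars e.2.1)) ("", 0, 0)).2.1) := by
      rw [List.map_map]
      exact pv_maxD_map inventory (fun e => PySem.Chars.len (PySem.Int.toChars e.2.1)) 0 ("", 0, 0) hinv
    have e3 : PySem.List.maxD ((inventory.map (fun e : String × Int × Int => PySem.Int.toChars e.2.2)).map PySem.Chars.len) (fun n => n) 0
        = PySem.Chars.len (PySem.Int.toChars (PySem.List.maxD inventory (fun e => PySem.Chars.len (PySem.Int.toChars e.2.2)) ("", 0, 0)).2.2) := by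
      rw [List.map_map]
      exact pv_maxD_map inventory (fun e => PySem.Chars.len (PySem.Int.toChars e.2.2)) 0 ("", 0, 0) hinv
    rw [show PySem.Str.len "Item" = 4 from rfl, show PySem.Str.len "Qty" = 3 from rfl,
      show PySem.Str.len "Value" = 5 from rfl]
    rw [e1, e2, e3]
    -- name the (now shared) widths
    set il : Int := max (min (PySem.Str.len (PySem.List.maxD (inventory.map (fun e : String × Int × Int => e.1)) (fun s => PySem.Str.len s) "")) 50) 4 with hil
    set ql : Int := max (PySem.Chars.len (PySem.Int.toChars (PySem.List.maxD inventory (fun e => PySem.Chars.len (PySem.Int.toChars e.2.1)) ("", 0, 0)).2.1)) 3 with hql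
    set vl : Int := max (PySem.Chars.len (PySem.Int.toChars (PySem.List.maxD inventory (fun e => PySem.Chars.len (PySem.Int.toChars e.2.2)) ("", 0, 0)).2.2)) 5 with hvl
    -- A: loop = header ++ joined rows; B: fuse the cell maps, transpose, peel the two header rows
    rw [pv_foldl_append_join]
    rw [List.map_map, List.map_map, List.map_map, List.map_map]
    simp only [List.zip_cons_cons]
    rw [pv_zip3_map]
    rw [PySem.List.enumerate_cons, PySem.List.enumerate_cons]
    simp only [List.map_cons]
    simp only [zero_add, if_true]
    rw [show (1 : Int) + 1 = 2 from rfl]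
    rw [pv_enum_tail _ 2 (by omega) _
        (fun t : List Char × List Char × List Char =>
          ((t.1 ++ " | ".toList) ++ t.2.1 ++ " | ".toList) ++ t.2.2 ++ ['\n'])
        (by intro i x hi; simp only [hi, if_false])]
    rw [List.map_map]
    rw [pv_join_nil_cons, pv_join_nil_cons, ← List.append_assoc]
    refine congrArg String.ofList ?_
    refine congrArg₂ (· ++ ·) ?_ ?_
    · -- A's header block = B's padded-header row ++ dash row
      have h1 : " | Qty".toList = " | ".toList ++ "Qty".toList := rfl
      have h2 : " | Value".toList = " | ".toList ++ "Value".toList := rfl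
      rw [h1, h2]
      simp [pvPad, pvDashes, List.append_assoc]
    · -- the data rows coincide
      refine congrArg (PySem.Chars.join []) ?_
      refine congrArg (fun g => List.map g inventory) ?_
      funext e
      simp [pvPad, List.append_assoc, PySem.Str.len]

-- ===== VERDICT (by name: the statement is the Claim_ definition above) =====
theorem buildLootTable_spec : Claim_equal_buildLootTable := by
  intro inventory _
  unfold Spec_buildLootTable
  exact pv_ports_eq inventory
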